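-- pv_equiv track=rewrite | github.com/smirfanshah/Blind75 | CodeSignal-InterviewPrac.py | solution11
-- ===== SOURCE A (Python) =====
-- import math
--
-- def concat_values(array):
--     return ''.join(map(str,array))
--
-- def solution11(array1, array2):
--     """You are given two arrays of equal length. Your task is to find a rotation of the first array that minimizes the manhattan distance(sum of absolute differences between corresponding elements of the two arrays). If multiple rotations yield the same minimum sum, return the rotation that results in the smallest concatenated value when the elements are joined together as strings.:"""
--     size= len(array1)
--     best_score= math.inf
--     best_rotation= None
--     for i in range(size):
--         score =0
--         for j in range(size):
--             score+= abs(array1[j-i]-array2[j])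
--
--         rotated = array1[-i:]+array1[:-i] if i!=0 else array1
--
--         if score<best_score or (score==best_score and concat_values(rotated)<concat_values(best_rotation)):
--              best_score=score
--              best_rotation = rotated
--
--     return best_rotation, best_score
-- ===== SOURCE B (Python) =====
-- def concat_values(array):
--     return ''.join(map(str, array))
--
--
-- def rotation(array1, i):
--     n = len(array1)
--     doubled = array1 + array1
--     return doubled[n - i: 2 * n - i]
--
--
-- def solution11(array1, array2):
--     """Scatter each element pair's cost |array1[k]-array2[j]| into a table of
--     scores indexed by the shift (j-k) % n, then select the best shift in two
--     passes: the minimal table entry, and among shifts reaching it the rotation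
--     with the smallest concatenated string (first one wins ties)."""
--     n = len(array1)
--     scores = [0] * n
--     for k in range(n):
--         x = array1[k]
--         for j in range(n):
--             scores[(j - k) % n] += abs(x - array2[j])
--     best_score = min(scores)
--     best_rotation = min((rotation(array1, i) for i in range(n) if scores[i] == best_score),
--                         key=concat_values)
--     return best_rotation, best_score
-- ===== Notes on version B (the rewrite author's own statement) =====
-- stated objective: alternative
-- what changed: B replaces A's per-rotation scoring loop and online best/tie tracking by a shift-indexed score table filled pair-major (each |array1[k]-array2[j]| is scattered into bucket (j-k)%n) followed by two separate selection passes: min over the table, then min-by-concatenated-string over the argmin shifts.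
-- outside the precondition, e.g. on solution11([], []): A returns (None, inf), B raises ValueError; on solution11([1, 2], [5]): A raises IndexError, B raises IndexError
import Mathlib
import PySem

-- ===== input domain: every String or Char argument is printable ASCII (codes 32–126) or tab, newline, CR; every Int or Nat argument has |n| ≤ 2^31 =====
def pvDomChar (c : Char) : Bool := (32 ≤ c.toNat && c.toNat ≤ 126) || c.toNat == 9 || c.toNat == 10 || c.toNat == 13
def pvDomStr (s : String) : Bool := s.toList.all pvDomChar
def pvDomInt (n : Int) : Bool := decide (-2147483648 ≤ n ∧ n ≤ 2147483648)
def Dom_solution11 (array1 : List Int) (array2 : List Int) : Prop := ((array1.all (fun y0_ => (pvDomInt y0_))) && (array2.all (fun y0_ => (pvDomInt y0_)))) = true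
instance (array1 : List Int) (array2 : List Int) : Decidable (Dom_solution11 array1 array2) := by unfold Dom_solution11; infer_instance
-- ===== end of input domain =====

-- B replaces A's per-rotation scoring and online best/tie tracking by a shift-indexed
-- score table filled pair-major, then two separate selection passes (objective: alternative).

-- ===== PORT A =====
-- ''.join(map(str, array)); shared helper of both Python sources
def concatValues (array : List Int) : List Char :=
  PySem.Chars.join [] (array.map PySem.Int.toChars)

def solution11 (array1 : List Int) (array2 : List Int) : List Int × Int :=
  let size : Int := PySem.List.len array1
  -- best_score = math.inf / best_rotation = None are modelled as `none`
  -- ('score < inf' is the `none => true` branch); Pre_ excludes the empty input,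
  -- where Python returns (None, inf), a value outside the declared type.
  let best := (PySem.List.pyRange 0 size 1).foldl
    (fun (best : Option (List Int) × Option Int) i =>
      let score : Int := (PySem.List.pyRange 0 size 1).foldl
        (fun s j => s + |PySem.List.pyGetD array1 (j - i) 0 - PySem.List.pyGetD array2 j 0|) 0
      let rotated := if i ≠ 0 then
          PySem.List.slice array1 (some (-i)) none ++ PySem.List.slice array1 none (some (-i))
        else array1
      let update : Bool :=
        match best.2 with
        | none => true
        | some bs => decide (score < bs) ||
            (decide (score = bs) && decide (concatValues rotated < concatValues (best.1.getD [])))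
      if update then (some rotated, some score) else best)
    (none, none)
  (best.1.getD [], best.2.getD 0)

-- ===== PORT B =====
-- helper rotation(array1, i): slice of the doubled list
def rotationB (array1 : List Int) (i : Int) : List Int :=
  let n : Int := PySem.List.len array1
  PySem.List.slice (array1 ++ array1) (some (n - i)) (some (2 * n - i))

def solution11_alt (array1 : List Int) (array2 : List Int) : List Int × Int :=
  let n : Int := PySem.List.len array1
  -- scores = [0]*n, then scores[(j-k) % n] += abs(array1[k] - array2[j]) pair-major
  let scores := (PySem.List.pyRange 0 n 1).foldl
    (fun sc k =>
      let x := PySem.List.pyGetD array1 k 0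
      (PySem.List.pyRange 0 n 1).foldl
        (fun sc j =>
          PySem.List.pySetD sc (PySem.Int.mod (j - k) n)
            (PySem.List.pyGetD sc (PySem.Int.mod (j - k) n) 0
              + |x - PySem.List.pyGetD array2 j 0|)) sc)
    (List.replicate n.toNat 0)
  -- best_score = min(scores); min on the empty list raises: Pre_ excludes it (getD is the dead branch)
  let bestScore := (PySem.List.min? scores (fun s => s)).getD 0
  -- min over the argmin shifts, keyed by the concatenated string (first one wins ties)
  let bestRotation := (PySem.List.min?
      (((PySem.List.pyRange 0 n 1).filter
          (fun i => PySem.List.pyGetD scores i 0 == bestScore)).map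
        (fun i => rotationB array1 i))
      (fun r => concatValues r)).getD []
  (bestRotation, bestScore)

-- ===== PRECONDITION & SPEC =====
-- Pre_ excludes (a) empty array1, where Python A returns (None, math.inf) — not a value of the
-- declared (list, int) type — and (b) array2 shorter than array1, where A raises IndexError.
def Pre_solution11 (array1 : List Int) (array2 : List Int) : Prop :=
  array1 ≠ [] ∧ array1.length ≤ array2.length
instance (array1 : List Int) (array2 : List Int) : Decidable (Pre_solution11 array1 array2) := by
  unfold Pre_solution11; infer_instance

def pvWitness_solution11 : List Int × List Int := ([1, 2, 3], [3, 1, 2])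

def Spec_solution11 (array1 : List Int) (array2 : List Int) (out : List Int × Int) : Prop := out = solution11_alt array1 array2
instance (array1 : List Int) (array2 : List Int) (out : List Int × Int) : Decidable (Spec_solution11 array1 array2 out) := by unfold Spec_solution11; infer_instance

-- ===== CLAIM (what is proved, stated in full; the proofs are below) =====
def Claim_equal_solution11 : Prop := ∀ (array1 : List Int) (array2 : List Int), Dom_solution11 array1 array2 → Pre_solution11 array1 array2 → Spec_solution11 array1 array2 (solution11 array1 array2)

-- ===== LEMMAS AND PROOFS =====

-- canonical per-shift data shared by the two sides of the proof
def pvScore (a1 a2 : List Int) (i : Int) : Int :=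
  ((PySem.List.pyRange 0 (a1.length : Int) 1).map
    (fun j => |PySem.List.pyGetD a1 (PySem.Int.mod (j - i) (a1.length : Int)) 0
                - PySem.List.pyGetD a2 j 0|)).sum

def pvCand (a1 a2 : List Int) (i : Int) : List Int × Int := (rotationB a1 i, pvScore a1 a2 i)

def pvCands (a1 a2 : List Int) : List (List Int × Int) :=
  (PySem.List.pyRange 0 (a1.length : Int) 1).map (pvCand a1 a2)

-- A's update step, abstracted over the candidate pair
def pvStepA (best : Option (List Int) × Option Int) (c : List Int × Int) :
    Option (List Int) × Option Int :=
  let update : Bool :=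
    match best.2 with
    | none => true
    | some bs => decide (c.2 < bs) ||
        (decide (c.2 = bs) && decide (concatValues c.1 < concatValues (best.1.getD [])))
  if update then (some c.1, some c.2) else best

-- the lexicographic winner of two candidates (score first, concat string second, first wins ties)
def pvWin (m c : List Int × Int) : List Int × Int :=
  if (decide (c.2 < m.2) || !decide (m.2 < c.2) && decide (concatValues c.1 < concatValues m.1))
  then c else m

def pvStepM (acc : Option (List Int × Int)) (c : List Int × Int) : Option (List Int × Int) :=
  match acc with
  | none => some c
  | some m => some (pvWin m c)

-- B's two selection passes, over an arbitrary candidate list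
def pvBestScore (cs : List (List Int × Int)) : Int :=
  (PySem.List.min? (cs.map (fun c => c.2)) (fun s => s)).getD 0

def pvBestRot (cs : List (List Int × Int)) : List Int :=
  (PySem.List.min? ((cs.filter (fun c => c.2 == pvBestScore cs)).map (fun c => c.1))
    (fun r => concatValues r)).getD []

-- ---------- selection phase: the online fold equals the two-pass selection ----------

theorem pvWin_snd (m c : List Int × Int) : (pvWin m c).2 = min m.2 c.2 := by
  unfold pvWin
  split_ifs with h
  · simp only [Bool.or_eq_true, decide_eq_true_eq, Bool.and_eq_true, Bool.not_eq_eq_eq_not,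
      Bool.not_true, decide_eq_false_iff_not] at h
    rw [min_def]; split_ifs with h2 <;> rcases h with h | ⟨h, _⟩ <;> omega
  · simp only [Bool.or_eq_true, decide_eq_true_eq, Bool.and_eq_true, Bool.not_eq_eq_eq_not,
      Bool.not_true, decide_eq_false_iff_not, not_or, not_and] at h
    rw [min_def]; split_ifs with h2 <;> omega

theorem pvBestScore_cons (x : List Int × Int) (t : List (List Int × Int)) :
    pvBestScore (x :: t) = (t.map (fun c => c.2)).foldl min x.2 := by
  simp [pvBestScore, PySem.List.min?_id_cons]

theorem pvBestScore_win (m c : List Int × Int) (t : List (List Int × Int)) :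
    pvBestScore (m :: c :: t) = pvBestScore (pvWin m c :: t) := by
  rw [pvBestScore_cons, pvBestScore_cons, pvWin_snd]
  simp [List.foldl_cons]

theorem pv_min?_cons_cons {α κ : Type} [LT κ] [DecidableLT κ] (x y : α) (l : List α)
    (key : α → κ) :
    PySem.List.min? (x :: y :: l) key
      = PySem.List.min? ((if key y < key x then y else x) :: l) key := by
  unfold PySem.List.min?
  simp only [List.foldl_cons]
  congr 1
  split_ifs <;> rfl

theorem pvBestRot_win (m c : List Int × Int) (t : List (List Int × Int)) :
    pvBestRot (m :: c :: t) = pvBestRot (pvWin m c :: t) := by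
  have hbs := pvBestScore_win m c t
  have hmin : pvBestScore (m :: c :: t) ≤ min m.2 c.2 := by
    rw [pvBestScore_cons]
    simpa using (PySem.List.foldl_min_le (t.map (fun c => c.2)) (min m.2 c.2)).1
  unfold pvBestRot
  rw [← hbs]
  set bs := pvBestScore (m :: c :: t) with hbsdef
  simp only [List.filter_cons]
  by_cases hm : m.2 = bs
  · by_cases hc : c.2 = bs
    · -- tie on the minimal score: the concat comparison decides, first wins
      have heq : c.2 = m.2 := by omega
      have h1 : (decide (c.2 < m.2)) = false := by simp; omega
      have h2 : (decide (m.2 < c.2)) = false := by simp; omega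
      have hwin : pvWin m c = if concatValues c.1 < concatValues m.1 then c else m := by
        unfold pvWin; rw [h1, h2]; simp
      have hwin2 : (pvWin m c).2 = bs := by rw [pvWin_snd]; omega
      simp only [hm, hc, hwin2, beq_self_eq_true, if_pos]
      rw [List.map_cons, List.map_cons, List.map_cons, pv_min?_cons_cons]
      congr 2
      rw [hwin]
      split_ifs with h <;> rfl
    · -- c's score is not minimal: c is filtered out and m beats c online
      have hlt : m.2 < c.2 := by
        obtain ⟨hbm, hbc⟩ := le_min_iff.mp hmin; omega
      have hwin : pvWin m c = m := by
        unfold pvWin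
        rw [if_neg]
        simp only [Bool.or_eq_true, decide_eq_true_eq, Bool.and_eq_true, Bool.not_eq_eq_eq_not,
          Bool.not_true, decide_eq_false_iff_not, not_or, not_and]
        constructor
        · omega
        · intro h; omega
      rw [hwin]
      simp only [hm, beq_self_eq_true, if_pos, beq_iff_eq, if_neg hc]
  · by_cases hc : c.2 = bs
    · -- m's score is not minimal: m is filtered out and c beats m online
      have hlt : c.2 < m.2 := by
        obtain ⟨hbm, hbc⟩ := le_min_iff.mp hmin; omega
      have hwin : pvWin m c = c := by
        unfold pvWin; rw [if_pos]; simp; omega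
      rw [hwin]
      simp only [beq_iff_eq, if_neg hm, if_pos hc]
    · -- neither is minimal: both filtered out, whichever wins online is filtered out too
      have hw2 : (pvWin m c).2 ≠ bs := by
        rw [pvWin_snd]; rcases min_choice m.2 c.2 with h | h <;> rw [h] <;> omega
      simp only [beq_iff_eq, if_neg hm, if_neg hc, if_neg hw2]

theorem pvTwoPhase : ∀ (cs : List (List Int × Int)) (m : List Int × Int),
    cs.foldl pvStepM (some m) = some (pvBestRot (m :: cs), pvBestScore (m :: cs)) := by
  intro cs
  induction cs with
  | nil =>
    intro m
    simp [pvBestRot, pvBestScore, PySem.List.min?]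
  | cons c t ih =>
    intro m
    rw [List.foldl_cons, show pvStepM (some m) c = some (pvWin m c) from rfl, ih (pvWin m c),
      ← pvBestScore_win, ← pvBestRot_win]

-- A's online fold stays in sync with pvStepM's fold
theorem foldl_stepA_sync (cs : List (List Int × Int)) (o : Option (List Int × Int)) :
    cs.foldl pvStepA (o.map Prod.fst, o.map Prod.snd) =
      ((cs.foldl pvStepM o).map Prod.fst, (cs.foldl pvStepM o).map Prod.snd) := by
  induction cs generalizing o with
  | nil => rfl
  | cons c cs ih =>
    cases o with
    | none =>
      simpa [pvStepA, pvStepM] using ih (some c)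
    | some m =>
      simp only [Option.map_some, List.foldl_cons]
      have hM : pvStepM (some m) c = some (pvWin m c) := rfl
      rw [hM]
      by_cases h1 : c.2 < m.2
      · rw [show pvStepA (some m.1, some m.2) c = (some c.1, some c.2) by simp [pvStepA, h1],
            show pvWin m c = c by unfold pvWin; rw [if_pos]; simp; omega]
        simpa using ih (some c)
      · by_cases h3 : c.2 = m.2
        · have h2 : ¬ m.2 < c.2 := by omega
          by_cases hcv : concatValues c.1 < concatValues m.1
          · rw [show pvStepA (some m.1, some m.2) c = (some c.1, some c.2) by
                  simp [pvStepA, h3, hcv],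
                show pvWin m c = c by unfold pvWin; rw [if_pos]; simp [hcv]; omega]
            simpa using ih (some c)
          · rw [show pvStepA (some m.1, some m.2) c = (some m.1, some m.2) by
                  simp [pvStepA, h3, hcv],
                show pvWin m c = m by
                  unfold pvWin; rw [if_neg]; simp [hcv]; omega]
            simpa using ih (some m)
        · have h2 : m.2 < c.2 := by omega
          rw [show pvStepA (some m.1, some m.2) c = (some m.1, some m.2) by simp [pvStepA, h1, h3],
              show pvWin m c = m by unfold pvWin; rw [if_neg]; simp; omega]
          simpa using ih (some m)

-- ---------- rotations: A's negative slices = B's doubled-list slice ----------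

theorem rotationB_eq_drop_take (a1 : List Int) (i : Int) (h0 : 0 ≤ i)
    (hn : i < (a1.length : Int)) :
    rotationB a1 i = a1.drop (a1.length - i.toNat) ++ a1.take (a1.length - i.toNat) := by
  unfold rotationB
  simp only [PySem.List.len_eq]
  rw [PySem.List.slice_toNat _ (by omega) (by omega)]
  have h1 : ((a1.length : Int) - i).toNat = a1.length - i.toNat := by omega
  rw [h1]
  have h2 : (2 * (a1.length : Int) - i).toNat - (a1.length - i.toNat) = a1.length := by omega
  rw [h2]
  have hd : a1.length - i.toNat ≤ a1.length := by omega
  rw [List.drop_append, Nat.sub_eq_zero_of_le hd, List.drop_zero, List.take_append,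
      List.take_of_length_le (by rw [List.length_drop]; omega), List.length_drop,
      Nat.sub_sub_self hd]

theorem rotA_eq (a1 : List Int) (i : Int) (h0 : 0 ≤ i) (hn : i < (a1.length : Int)) :
    (if i ≠ 0 then
        PySem.List.slice a1 (some (-i)) none ++ PySem.List.slice a1 none (some (-i))
      else a1) = rotationB a1 i := by
  rw [rotationB_eq_drop_take a1 i h0 hn]
  by_cases hi : i = 0
  · subst hi; simp
  · have hk : 0 < i.toNat := by omega
    have hneg : -i = -(i.toNat : Int) := by omega
    rw [if_pos hi, hneg, PySem.List.slice_from_neg_natCast a1 i.toNat hk,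
        PySem.List.slice_to_neg_natCast a1 i.toNat hk]

-- ---------- scores: A's wrap-around indexing = the canonical mod form ----------

theorem pvWrapGet (xs : List Int) (t : Int) (h1 : -(xs.length : Int) ≤ t)
    (h2 : t < (xs.length : Int)) (hn : 0 < xs.length) :
    PySem.List.pyGetD xs t 0 = PySem.List.pyGetD xs (PySem.Int.mod t (xs.length : Int)) 0 := by
  have hN : (0 : Int) < (xs.length : Int) := by exact_mod_cast hn
  by_cases hc : 0 ≤ t
  · rw [PySem.Int.mod_eq_emod_of_pos hN, Int.emod_eq_of_lt hc h2]
  · have hmod : PySem.Int.mod t (xs.length : Int) = t + xs.length := by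
      rw [PySem.Int.mod_eq_emod_of_pos hN, Int.emod_eq_add_self_emod,
          Int.emod_eq_of_lt (by omega) (by omega)]
    rw [hmod]
    have hge : (0 : Int) ≤ t + xs.length := by omega
    have hlt : t + (xs.length : Int) < xs.length := by omega
    have hidx : xs.length - (-t).toNat = (t + xs.length).toNat := by omega
    simp only [PySem.List.pyGetD, PySem.List.pyGet?, PySem.List.pyIdx?,
      if_neg (by omega : ¬ (0 : Int) ≤ t), if_pos h1, if_pos hge, if_pos hlt, hidx]

theorem scoreA_eq (a1 a2 : List Int) (i : Int) (h0 : 0 ≤ i) (hn : i < (a1.length : Int)) :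
    (PySem.List.pyRange 0 (a1.length : Int) 1).foldl
        (fun s j => s + |PySem.List.pyGetD a1 (j - i) 0 - PySem.List.pyGetD a2 j 0|) 0
      = pvScore a1 a2 i := by
  rw [PySem.List.foldl_add, zero_add]
  unfold pvScore
  refine congrArg List.sum (List.map_congr_left ?_)
  intro j hj
  rw [PySem.List.mem_pyRange_one] at hj
  rw [pvWrapGet a1 (j - i) (by omega) (by omega) (by omega)]

-- ---------- A's whole loop = two-pass selection over the canonical candidates ----------

theorem solutionA_fold (a1 a2 : List Int) :
    solution11 a1 a2 =
      (((PySem.List.pyRange 0 (a1.length : Int) 1).foldl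
          (fun b i => pvStepA b (pvCand a1 a2 i)) (none, none)).1.getD [],
       ((PySem.List.pyRange 0 (a1.length : Int) 1).foldl
          (fun b i => pvStepA b (pvCand a1 a2 i)) (none, none)).2.getD 0) := by
  unfold solution11
  simp only [PySem.List.len_eq]
  refine congrArg (fun (F : Option (List Int) × Option Int) => (F.1.getD [], F.2.getD 0)) ?_
  apply PySem.List.foldl_congr_mem
  intro acc x hx
  rw [PySem.List.mem_pyRange_one] at hx
  simp only [pvStepA, pvCand]
  simp only [scoreA_eq a1 a2 x hx.1 hx.2, rotA_eq a1 x hx.1 hx.2]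
  rfl

theorem solutionA_eq (a1 a2 : List Int) (hne : a1 ≠ []) :
    solution11 a1 a2 = (pvBestRot (pvCands a1 a2), pvBestScore (pvCands a1 a2)) := by
  rw [solutionA_fold a1 a2, ← List.foldl_map]
  have hcs : (PySem.List.pyRange 0 (a1.length : Int) 1).map (pvCand a1 a2) = pvCands a1 a2 := rfl
  rw [hcs]
  rcases hnl : pvCands a1 a2 with _ | ⟨c, t⟩
  · exfalso
    have hlen : (pvCands a1 a2).length = a1.length := by
      simp [pvCands, PySem.List.length_pyRange_one]
    rw [hnl] at hlen
    simp only [List.length_nil] at hlen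
    exact hne (List.length_eq_zero_iff.mp (by omega))
  · rw [List.foldl_cons,
        show pvStepA (none, none) c = (some c.1, some c.2) by simp [pvStepA]]
    have hsync := foldl_stepA_sync t (some c)
    simp only [Option.map_some] at hsync
    rw [hsync, pvTwoPhase t c]
    rfl

-- ---------- B's scatter fill = the canonical per-shift score table ----------

-- nested loop over k then j = one loop over the pair list
theorem pvFoldl2 {α β γ : Type} (K : List α) (J : List β) (g : γ → α → β → γ) (L : γ) :
    K.foldl (fun L k => J.foldl (fun L j => g L k j) L) L
      = (K.flatMap (fun k => J.map (Prod.mk k))).foldl (fun L p => g L p.1 p.2) L := by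
  induction K generalizing L with
  | nil => rfl
  | cons k K ih => simp [List.flatMap_cons, List.foldl_append, List.foldl_map, ih]

-- scatter-accumulate characterization: each bucket ends with its filtered sum
theorem pvScatter (idx : Int × Int → Int) (f : Int × Int → Int) :
    ∀ (ps : List (Int × Int)) (L : List Int),
      (∀ p ∈ ps, 0 ≤ idx p ∧ idx p < (L.length : Int)) →
      ((ps.foldl (fun acc p =>
          PySem.List.pySetD acc (idx p) (PySem.List.pyGetD acc (idx p) 0 + f p)) L).length
          = L.length ∧
       ∀ (m : Nat), m < L.length →
         PySem.List.pyGetD (ps.foldl (fun acc p =>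
             PySem.List.pySetD acc (idx p) (PySem.List.pyGetD acc (idx p) 0 + f p)) L) (m : Int) 0
           = PySem.List.pyGetD L (m : Int) 0
             + ((ps.filter (fun p => idx p == (m : Int))).map f).sum) := by
  intro ps
  induction ps with
  | nil => intro L _; simp
  | cons p ps ih =>
    intro L h
    obtain ⟨h0, hlt⟩ := h p (by simp)
    have hlen : (PySem.List.pySetD L (idx p) (PySem.List.pyGetD L (idx p) 0 + f p)).length
        = L.length := PySem.List.length_pySetD L _ _
    have h' : ∀ q ∈ ps, 0 ≤ idx q ∧ idx q <
        ((PySem.List.pySetD L (idx p) (PySem.List.pyGetD L (idx p) 0 + f p)).length : Int) := by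
      intro q hq; rw [hlen]; exact h q (by simp [hq])
    obtain ⟨ih1, ih2⟩ := ih _ h'
    constructor
    · rw [List.foldl_cons, ih1, hlen]
    · intro m hm
      rw [List.foldl_cons, ih2 m (by rw [hlen]; exact hm)]
      have hcast : idx p = (((idx p).toNat : Nat) : Int) := by omega
      have htn : (idx p).toNat < L.length := by omega
      rw [List.filter_cons]
      by_cases he : idx p = (m : Int)
      · have hmn : m = (idx p).toNat := by omega
        rw [hcast, PySem.List.pyGetD_pySetD_natCast L _ _ _ 0 htn, if_pos hmn,
            if_pos (show ((((idx p).toNat : Nat) : Int) == (m : Int)) = true by simp; omega),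
            List.map_cons, List.sum_cons, ← hmn]
        ring
      · have hmn : ¬ m = (idx p).toNat := by omega
        rw [hcast, PySem.List.pyGetD_pySetD_natCast L _ _ _ 0 htn, if_neg hmn,
            if_neg (show ¬ ((((idx p).toNat : Nat) : Int) == (m : Int)) = true by simp; omega)]

-- helpers for the pair-sum reindexing
theorem pvSumFlatMap {α : Type} (l : List α) (f : α → List Int) :
    (l.flatMap f).sum = (l.map (fun x => (f x).sum)).sum := by
  induction l with
  | nil => rfl
  | cons x l ih => simp [List.flatMap_cons, List.sum_append, ih]

theorem pvSumFilterMap {α : Type} (p : α → Bool) (f : α → Int) (l : List α) :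
    ((l.filter p).map f).sum = (l.map (fun x => if p x then f x else 0)).sum := by
  induction l with
  | nil => rfl
  | cons x l ih => by_cases h : p x <;> simp [h, ih]

-- the mod equation picks exactly one k per (i, j)
theorem pvModShift {N j i : Int} (hN : 0 < N) (hi0 : 0 ≤ i) (hi : i < N) (k : Int)
    (hk0 : 0 ≤ k) (hk : k < N) :
    PySem.Int.mod (j - k) N = i ↔ k = PySem.Int.mod (j - i) N := by
  rw [PySem.Int.mod_eq_emod_of_pos hN, PySem.Int.mod_eq_emod_of_pos hN]
  have key : ∀ a b : ℤ, (a - b % N) % N = (a - b) % N := by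
    intro a b; rw [Int.sub_emod, Int.emod_emod_of_dvd _ dvd_rfl, ← Int.sub_emod]
  constructor
  · intro h
    have : (j - i) % N = k := by
      rw [← h, key, show j - (j - k) = k by ring, Int.emod_eq_of_lt hk0 hk]
    omega
  · intro h
    rw [h, key, show j - (j - i) = i by ring, Int.emod_eq_of_lt hi0 hi]

theorem pvPairSum (a1 a2 : List Int) (m : Nat) (hm : m < a1.length) :
    ((((PySem.List.pyRange 0 (a1.length : Int) 1).flatMap
        (fun k => (PySem.List.pyRange 0 (a1.length : Int) 1).map (Prod.mk k))).filter
        (fun p => PySem.Int.mod (p.2 - p.1) (a1.length : Int) == (m : Int))).map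
        (fun p => |PySem.List.pyGetD a1 p.1 0 - PySem.List.pyGetD a2 p.2 0|)).sum
      = pvScore a1 a2 (m : Int) := by
  have hN : (0 : Int) < (a1.length : Int) := by omega
  rw [pvSumFilterMap, List.map_flatMap, pvSumFlatMap]
  unfold pvScore
  simp only [PySem.List.pyRange_one, List.map_map, Int.sub_zero, Int.toNat_natCast, zero_add]
  have hconv : ∀ (F : ℕ → ℤ), ((List.range a1.length).map F).sum
      = ∑ i ∈ Finset.range a1.length, F i := fun F => rfl
  simp only [Function.comp_def]
  simp only [hconv]
  rw [Finset.sum_comm]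
  refine Finset.sum_congr rfl ?_
  intro j hj
  rw [Finset.mem_range] at hj
  set k0 : ℕ := (PySem.Int.mod ((j : Int) - (m : Int)) (a1.length : Int)).toNat with hk0def
  have hk0lt : k0 < a1.length := by
    have := PySem.Int.mod_lt ((j : Int) - (m : Int)) hN
    have := PySem.Int.mod_nonneg ((j : Int) - (m : Int)) hN
    omega
  have hk0cast : (k0 : Int) = PySem.Int.mod ((j : Int) - (m : Int)) (a1.length : Int) := by
    have := PySem.Int.mod_nonneg ((j : Int) - (m : Int)) hN
    omega
  have hstep : ∀ k ∈ Finset.range a1.length,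
      (if (PySem.Int.mod ((j : Int) - (k : Int)) (a1.length : Int) == (m : Int))
       then |PySem.List.pyGetD a1 (k : Int) 0 - PySem.List.pyGetD a2 (j : Int) 0| else 0)
      = (if k = k0
         then |PySem.List.pyGetD a1 (k : Int) 0 - PySem.List.pyGetD a2 (j : Int) 0| else 0) := by
    intro k hk
    rw [Finset.mem_range] at hk
    congr 1
    rw [show ((PySem.Int.mod ((j : Int) - (k : Int)) (a1.length : Int) == (m : Int))) =
        decide (PySem.Int.mod ((j : Int) - (k : Int)) (a1.length : Int) = (m : Int)) from rfl]
    rw [decide_eq_decide.mpr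
        (pvModShift hN (by omega) (by exact_mod_cast hm) (k : Int) (by omega) (by exact_mod_cast hk))]
    rw [show (decide ((k : Int) = PySem.Int.mod ((j : Int) - (m : Int)) (a1.length : Int)))
        = decide (k = k0) by rw [decide_eq_decide]; omega]
    simp
  rw [Finset.sum_congr rfl hstep, Finset.sum_ite_eq' (Finset.range a1.length) k0]
  rw [if_pos (Finset.mem_range.mpr hk0lt), hk0cast]

theorem scores_eq (a1 a2 : List Int) :
    (PySem.List.pyRange 0 (a1.length : Int) 1).foldl
      (fun sc k => (PySem.List.pyRange 0 (a1.length : Int) 1).foldl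
        (fun sc j => PySem.List.pySetD sc (PySem.Int.mod (j - k) (a1.length : Int))
          (PySem.List.pyGetD sc (PySem.Int.mod (j - k) (a1.length : Int)) 0
            + |PySem.List.pyGetD a1 k 0 - PySem.List.pyGetD a2 j 0|)) sc)
      (List.replicate ((a1.length : Int)).toNat 0)
    = (PySem.List.pyRange 0 (a1.length : Int) 1).map (pvScore a1 a2) := by
  rcases Nat.eq_zero_or_pos a1.length with hz | hn
  · simp [hz]
  have hN : (0 : Int) < (a1.length : Int) := by exact_mod_cast hn
  rw [pvFoldl2 _ _ (fun sc (k j : Int) => PySem.List.pySetD sc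
      (PySem.Int.mod (j - k) (a1.length : Int))
      (PySem.List.pyGetD sc (PySem.Int.mod (j - k) (a1.length : Int)) 0
        + |PySem.List.pyGetD a1 k 0 - PySem.List.pyGetD a2 j 0|))]
  obtain ⟨hlen, hget⟩ := pvScatter (fun p => PySem.Int.mod (p.2 - p.1) (a1.length : Int))
    (fun p => |PySem.List.pyGetD a1 p.1 0 - PySem.List.pyGetD a2 p.2 0|)
    ((PySem.List.pyRange 0 (a1.length : Int) 1).flatMap
      (fun k => (PySem.List.pyRange 0 (a1.length : Int) 1).map (Prod.mk k)))
    (List.replicate ((a1.length : Int)).toNat 0)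
    (by
      intro p _
      simp only [List.length_replicate]
      constructor
      · exact PySem.Int.mod_nonneg _ hN
      · have := PySem.Int.mod_lt (p.2 - p.1) hN
        omega)
  apply List.ext_getElem
  · rw [hlen]
    simp [PySem.List.length_pyRange_one]
  · intro m h1 h2
    have hm : m < a1.length := by
      rw [hlen] at h1; simpa using h1
    have hgm := hget m (by simpa using hm)
    rw [PySem.List.pyGetD_natCast, PySem.List.pyGetD_natCast] at hgm
    rw [List.getD_eq_getElem?_getD, List.getElem?_eq_getElem h1] at hgm
    simp only [Option.getD_some] at hgm
    rw [hgm]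
    have hrep : (List.replicate ((a1.length : Int)).toNat (0 : Int)).getD m 0 = 0 := by
      simp
    rw [hrep, zero_add, pvPairSum a1 a2 m hm]
    rw [List.getElem_map, PySem.List.getElem_pyRange_one]
    simp

-- ---------- B's whole body = two-pass selection over the canonical candidates ----------

theorem cands_map_snd (a1 a2 : List Int) :
    (pvCands a1 a2).map (fun c => c.2)
      = (PySem.List.pyRange 0 (a1.length : Int) 1).map (pvScore a1 a2) := by
  unfold pvCands
  rw [List.map_map]
  rfl

theorem cands_filter_map (a1 a2 : List Int) (bs : Int) :
    ((PySem.List.pyRange 0 (a1.length : Int) 1).filter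
        (fun i => PySem.List.pyGetD
          ((PySem.List.pyRange 0 (a1.length : Int) 1).map (pvScore a1 a2)) i 0 == bs)).map
      (fun i => rotationB a1 i)
    = ((pvCands a1 a2).filter (fun c => c.2 == bs)).map (fun c => c.1) := by
  rw [List.filter_congr (fun i hi => ?_), pvCands, List.filter_map, List.map_map]
  · rfl
  · rw [PySem.List.mem_pyRange_one] at hi
    rw [PySem.List.pyGetD_map_pyRange_of_nonneg _ _ _ _ hi.1 hi.2]
    rfl

theorem solutionB_eq (a1 a2 : List Int) :
    solution11_alt a1 a2 = (pvBestRot (pvCands a1 a2), pvBestScore (pvCands a1 a2)) := by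
  unfold solution11_alt
  simp only [PySem.List.len_eq]
  rw [scores_eq a1 a2]
  rw [show (PySem.List.min? ((PySem.List.pyRange 0 (a1.length : Int) 1).map (pvScore a1 a2))
        (fun s => s)).getD 0 = pvBestScore (pvCands a1 a2) by
      rw [← cands_map_snd]; rfl]
  rw [cands_filter_map a1 a2 (pvBestScore (pvCands a1 a2))]
  rfl

-- ===== VERDICT (by name: the statement is the Claim_ definition above) =====
theorem solution11_spec : Claim_equal_solution11 := by
  intro a1 a2 _hdom hpre
  obtain ⟨hne, _hlen⟩ := hpre
  unfold Spec_solution11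
  rw [solutionA_eq a1 a2 hne, solutionB_eq a1 a2]
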